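-- pv_equiv track=rewrite | github.com/sawantaniket461/clean_preprocess_annotate_PROGRESSdata | bin/CleanOneLineDataTable_clean.py | calcSSS
-- ===== SOURCE A (Python) =====
-- def calcSSS(p_id, vals):
--     """
--     Calculate the Segment Stenosis Score (SSS) for a given patient ID and dictionary of values.
--
--     :param p_id: An identifier for the patient.
--     :type p_id: Any hashable type
--     :param vals: A dictionary containing values to be used in the calculation of SSS.
--     :type vals: dict
--     :return: The calculated Segment Stenosis Score (SSS).
--     :rtype: int
--     """
--     sss = []
--     for v in vals.values():
--         sten = int(v)
--         if sten == 0: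
--             sss.append(0)
--         elif 1 <= sten <= 24:
--             sss.append(1)
--         elif 25 <= sten <= 49:
--             sss.append(2)
--         elif 50 <= sten <= 69:
--             sss.append(3)
--         elif 70 <= sten <= 99:
--             sss.append(4)
--         elif sten == 100:
--             sss.append(5)
--     return sum(sss)
-- ===== SOURCE B (Python) =====
-- _BOUNDS = (1, 25, 50, 70, 100)
--
-- def calcSSS(p_id, vals):
--     total = 0
--     for v in vals.values():
--         sten = int(v)
--         if 0 <= sten <= 100:
--             # score = number of bin lower-bounds <= sten (table lookup, no if-ladder)
--             total += sum(1 for b in _BOUNDS if b <= sten)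
--     return total
-- ===== Notes on version B (the rewrite author's own statement) =====
-- stated objective: idiomatic
-- what changed: Replaces the six-branch if-elif ladder and intermediate score list with a single running total whose per-value score is computed as the count of bin lower-bounds (1,25,50,70,100) that the value reaches, with one range guard 0<=sten<=100.
import Mathlib
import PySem

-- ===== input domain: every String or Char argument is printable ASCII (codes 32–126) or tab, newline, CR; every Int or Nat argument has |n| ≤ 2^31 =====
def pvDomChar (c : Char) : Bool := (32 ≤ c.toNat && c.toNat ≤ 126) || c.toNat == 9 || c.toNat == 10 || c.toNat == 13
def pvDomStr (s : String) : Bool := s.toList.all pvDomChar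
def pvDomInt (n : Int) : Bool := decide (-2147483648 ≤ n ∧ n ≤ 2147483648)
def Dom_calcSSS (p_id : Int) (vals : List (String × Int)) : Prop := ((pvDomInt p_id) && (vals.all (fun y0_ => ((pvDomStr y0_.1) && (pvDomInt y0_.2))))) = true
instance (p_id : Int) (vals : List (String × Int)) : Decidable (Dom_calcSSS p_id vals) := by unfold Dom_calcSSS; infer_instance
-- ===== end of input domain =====

-- ===== PORT A =====
-- A: builds a list of per-value scores via an if-elif ladder, then sums it.
def calcSSS (p_id : Int) (vals : List (String × Int)) : Int :=
  let sss : List Int :=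
    (vals.map (fun kv => kv.2)).foldl (fun sss v =>
      let sten := v
      if sten == 0 then sss ++ [0]
      else if 1 ≤ sten ∧ sten ≤ 24 then sss ++ [1]
      else if 25 ≤ sten ∧ sten ≤ 49 then sss ++ [2]
      else if 50 ≤ sten ∧ sten ≤ 69 then sss ++ [3]
      else if 70 ≤ sten ∧ sten ≤ 99 then sss ++ [4]
      else if sten == 100 then sss ++ [5]
      else sss) []
  sss.sum

-- ===== PORT B =====
-- B: running total; each in-range value scores the count of bin lower-bounds it reaches.
def pvBounds : List Int := [1, 25, 50, 70, 100]

def calcSSS_alt (p_id : Int) (vals : List (String × Int)) : Int :=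
  (vals.map (fun kv => kv.2)).foldl (fun total v =>
    let sten := v
    if 0 ≤ sten ∧ sten ≤ 100 then
      total + (pvBounds.foldl (fun c b => if b ≤ sten then c + 1 else c) 0)
    else total) 0

-- ===== PRECONDITION & SPEC =====
def Spec_calcSSS (p_id : Int) (vals : List (String × Int)) (out : Int) : Prop := out = calcSSS_alt p_id vals
instance (p_id : Int) (vals : List (String × Int)) (out : Int) : Decidable (Spec_calcSSS p_id vals out) := by unfold Spec_calcSSS; infer_instance

-- ===== CLAIM (what is proved, stated in full; the proofs are below) =====
def Claim_equal_calcSSS : Prop := ∀ (p_id : Int) (vals : List (String × Int)), Dom_calcSSS p_id vals → Spec_calcSSS p_id vals (calcSSS p_id vals)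

-- ===== LEMMAS AND PROOFS =====

-- the common per-value contribution
def pvContrib (s : Int) : Int :=
  if 0 ≤ s ∧ s ≤ 100 then pvBounds.foldl (fun c b => if b ≤ s then c + 1 else c) 0 else 0

set_option maxHeartbeats 1600000 in
theorem pvStepA_sum (acc : List Int) (s : Int) :
    (if s == 0 then acc ++ [(0:Int)]
     else if 1 ≤ s ∧ s ≤ 24 then acc ++ [1]
     else if 25 ≤ s ∧ s ≤ 49 then acc ++ [2]
     else if 50 ≤ s ∧ s ≤ 69 then acc ++ [3]
     else if 70 ≤ s ∧ s ≤ 99 then acc ++ [4]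
     else if s == 100 then acc ++ [5]
     else acc).sum = acc.sum + pvContrib s := by
  simp only [pvContrib, pvBounds, List.foldl_cons, List.foldl_nil, beq_iff_eq]
  split_ifs <;> (try simp only [List.sum_append, List.sum_cons, List.sum_nil]) <;> omega

theorem pvFoldA_sum (l : List Int) : ∀ acc : List Int,
    (l.foldl (fun sss v =>
      if v == 0 then sss ++ [(0:Int)]
      else if 1 ≤ v ∧ v ≤ 24 then sss ++ [1]
      else if 25 ≤ v ∧ v ≤ 49 then sss ++ [2]
      else if 50 ≤ v ∧ v ≤ 69 then sss ++ [3]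
      else if 70 ≤ v ∧ v ≤ 99 then sss ++ [4]
      else if v == 100 then sss ++ [5]
      else sss) acc).sum = acc.sum + (l.map pvContrib).sum := by
  induction l with
  | nil => intro acc; simp
  | cons x xs ih =>
    intro acc
    simp only [List.foldl_cons, List.map_cons, List.sum_cons, ih, pvStepA_sum]
    ring

theorem pvFoldB_sum (l : List Int) : ∀ t : Int,
    (l.foldl (fun total v =>
      if 0 ≤ v ∧ v ≤ 100 then
        total + (pvBounds.foldl (fun c b => if b ≤ v then c + 1 else c) 0)
      else total) t) = t + (l.map pvContrib).sum := by
  induction l with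
  | nil => intro t; simp
  | cons x xs ih =>
    intro t
    simp only [List.foldl_cons, List.map_cons, List.sum_cons, ih, pvContrib]
    split_ifs <;> ring

-- ===== VERDICT (by name: the statement is the Claim_ definition above) =====
theorem calcSSS_spec : Claim_equal_calcSSS := by
  intro p_id vals _
  unfold Spec_calcSSS calcSSS calcSSS_alt
  rw [pvFoldA_sum, pvFoldB_sum]
  simp
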